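-- pv_equiv track=rewrite | github.com/peteris-racinskis/pytorch_mnist | src/edi_segmentation/datasets/vfw.py | _link_indices
-- ===== SOURCE A (Python) =====
-- def _link_indices(subsets):
--     running_total = 0
--     subsets_with_ranges = []
--     for subset in subsets:
--         start = running_total
--         running_total += len(subset)
--         stop = running_total
--         subsets_with_ranges.append((subset, start, stop))
--     return subsets_with_ranges
-- ===== SOURCE B (Python) =====
-- def _link_indices(subsets):
--     # Recursive decomposition: compute the tail's ranges at origin 0,
--     # then shift them by the head's length. No running total is threaded.
--     if not subsets:
--         return []
--     first = subsets[0]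
--     n = len(first)
--     tail = _link_indices(subsets[1:])
--     return [(first, 0, n)] + [(s, a + n, b + n) for (s, a, b) in tail]
-- ===== Notes on version B (the rewrite author's own statement) =====
-- stated objective: alternative
-- what changed: Replaces the single-pass running-total accumulator with a structural recursion: the tail's ranges are computed independently at origin 0 and then shifted by the head's length.
import Mathlib
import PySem

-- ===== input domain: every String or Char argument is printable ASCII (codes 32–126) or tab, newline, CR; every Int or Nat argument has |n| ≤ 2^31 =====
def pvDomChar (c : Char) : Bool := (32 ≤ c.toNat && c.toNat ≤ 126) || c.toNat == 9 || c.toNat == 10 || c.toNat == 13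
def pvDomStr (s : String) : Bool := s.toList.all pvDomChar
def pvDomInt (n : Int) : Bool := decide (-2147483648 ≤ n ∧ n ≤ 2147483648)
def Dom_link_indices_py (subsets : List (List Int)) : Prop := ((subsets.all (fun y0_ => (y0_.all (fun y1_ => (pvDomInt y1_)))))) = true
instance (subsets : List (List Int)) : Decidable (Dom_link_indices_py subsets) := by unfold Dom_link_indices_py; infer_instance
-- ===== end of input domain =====

-- B replaces A's running-total accumulator loop with a structural recursion that
-- computes the tail's ranges at origin 0 and shifts them by the head's length
-- (objective: alternative decomposition, not faster).

-- ===== PORT A =====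
-- running_total / subsets_with_ranges carried through the loop as a pair.
def link_indices_py (subsets : List (List Int)) : List (List Int × Int × Int) :=
  (subsets.foldl
    (fun (st : Int × List (List Int × Int × Int)) subset =>
      let start := st.1
      let running_total := st.1 + (subset.length : Int)
      let stop := running_total
      (running_total, st.2 ++ [(subset, start, stop)]))
    (0, [])).2

-- ===== PORT B =====
-- recursive: head at (0, n), tail's result shifted by n.
def link_indices_py_alt (subsets : List (List Int)) : List (List Int × Int × Int) :=
  match subsets with
  | [] => []
  | first :: rest =>
      let n : Int := (first.length : Int)
      (first, 0, n) :: (link_indices_py_alt rest).map (fun t => (t.1, t.2.1 + n, t.2.2 + n))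

-- ===== PRECONDITION & SPEC =====
def Spec_link_indices_py (subsets : List (List Int)) (out : List (List Int × Int × Int)) : Prop := out = link_indices_py_alt subsets
instance (subsets : List (List Int)) (out : List (List Int × Int × Int)) : Decidable (Spec_link_indices_py subsets out) := by unfold Spec_link_indices_py; infer_instance

-- ===== CLAIM (what is proved, stated in full; the proofs are below) =====
def Claim_equal_link_indices_py : Prop := ∀ (subsets : List (List Int)), Dom_link_indices_py subsets → Spec_link_indices_py subsets (link_indices_py subsets)

-- ===== LEMMAS AND PROOFS =====

-- A's loop from an arbitrary running total rt and accumulator acc equals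
-- acc ++ (B's result shifted by rt).
theorem link_indices_loop_eq (subsets : List (List Int)) : ∀ (rt : Int) (acc : List (List Int × Int × Int)),
    (subsets.foldl
      (fun (st : Int × List (List Int × Int × Int)) subset =>
        (st.1 + (subset.length : Int), st.2 ++ [(subset, st.1, st.1 + (subset.length : Int))]))
      (rt, acc)).2
    = acc ++ (link_indices_py_alt subsets).map (fun t => (t.1, t.2.1 + rt, t.2.2 + rt)) := by
  induction subsets with
  | nil => simp [link_indices_py_alt]
  | cons hd tl ih =>
      intro rt acc
      simp only [List.foldl_cons, link_indices_py_alt, List.map_cons, List.map_map]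
      rw [ih]
      simp only [List.append_assoc, List.singleton_append]
      refine congrArg₂ (· ++ ·) rfl (congrArg₂ List.cons ?_ ?_)
      · simp only [Prod.ext_iff]
        exact ⟨trivial, by ring, by ring⟩
      refine List.map_congr_left (fun t _ => ?_)
      simp only [Function.comp, Prod.ext_iff]
      exact ⟨trivial, by ring, by ring⟩

-- ===== VERDICT (by name: the statement is the Claim_ definition above) =====
theorem link_indices_py_spec : Claim_equal_link_indices_py := by
  intro subsets _
  unfold Spec_link_indices_py link_indices_py
  have h := link_indices_loop_eq subsets 0 []
  simp only [List.nil_append] at h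
  rw [h]
  simp
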